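-- pv_equiv track=rewrite | github.com/braymix/AssistantAiEasy | knowledgehub/src/detection/engine.py | _inject_system_message
-- ===== SOURCE A (Python) =====
-- def _inject_system_message(messages: list[dict], system_content: str) -> list[dict]:
--     """Insert a system message right after the first existing system message."""
--     enriched: list[dict] = []
--     injected = False
--     for msg in messages:
--         enriched.append(msg)
--         if msg["role"] == "system" and not injected:
--             enriched.append({"role": "system", "content": system_content})
--             injected = True
--     if not injected:
--         enriched.insert(0, {"role": "system", "content": system_content})
--     return enriched
-- ===== SOURCE B (Python) =====
-- def _inject_system_message(messages: list[dict], system_content: str) -> list[dict]: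
--     """Insert a system message right after the first existing system message."""
--     new_msg = {"role": "system", "content": system_content}
--     idx = next((i for i, m in enumerate(messages) if m["role"] == "system"), None)
--     if idx is None:
--         return [new_msg] + messages
--     return messages[:idx + 1] + [new_msg] + messages[idx + 1:]
-- ===== Notes on version B (the rewrite author's own statement) =====
-- stated objective: simpler
-- what changed: Replaces the incremental append-with-flag loop by a find-first-system-index then list-splice decomposition (no accumulator, no injected flag).
import Mathlib
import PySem

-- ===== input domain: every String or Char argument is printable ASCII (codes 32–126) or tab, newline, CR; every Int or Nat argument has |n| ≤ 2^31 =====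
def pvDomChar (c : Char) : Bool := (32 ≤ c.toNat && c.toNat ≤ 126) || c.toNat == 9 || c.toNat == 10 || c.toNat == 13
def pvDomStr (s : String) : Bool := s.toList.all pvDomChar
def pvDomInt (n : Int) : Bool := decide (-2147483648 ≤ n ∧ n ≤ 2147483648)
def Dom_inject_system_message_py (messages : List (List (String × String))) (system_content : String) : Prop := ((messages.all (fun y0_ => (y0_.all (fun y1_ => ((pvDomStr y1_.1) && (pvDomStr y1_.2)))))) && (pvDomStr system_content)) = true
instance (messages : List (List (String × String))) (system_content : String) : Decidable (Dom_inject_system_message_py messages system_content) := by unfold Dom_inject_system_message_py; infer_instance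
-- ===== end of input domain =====

-- B replaces A's append-with-flag accumulator loop by find-first-system-index then splice (objective: simpler).

-- ===== PORT A =====
-- the for-loop of A: state (enriched, injected); msg["role"] is first-match lookup on the
-- association list (exact under Pre_, which guarantees the key "role" is present)
def inject_system_message_py_loop (newMsg : List (String × String))
    (msgs : List (List (String × String)))
    (enriched : List (List (String × String))) (injected : Bool) :
    List (List (String × String)) × Bool :=
  match msgs with
  | [] => (enriched, injected)
  | msg :: rest =>
      let enriched1 := enriched ++ [msg]
      if (msg.lookup "role" == some "system") && !injected then
        inject_system_message_py_loop newMsg rest (enriched1 ++ [newMsg]) true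
      else
        inject_system_message_py_loop newMsg rest enriched1 injected

def inject_system_message_py (messages : List (List (String × String))) (system_content : String) : List (List (String × String)) :=
  let newMsg := [("role", "system"), ("content", system_content)]
  let r := inject_system_message_py_loop newMsg messages [] false
  if !r.2 then newMsg :: r.1 else r.1

-- ===== PORT B =====
def inject_system_message_py_alt (messages : List (List (String × String))) (system_content : String) : List (List (String × String)) :=
  let newMsg := [("role", "system"), ("content", system_content)]
  match messages.findIdx? (fun m => m.lookup "role" == some "system") with
  | none => newMsg :: messages
  | some i => messages.take (i + 1) ++ newMsg :: messages.drop (i + 1)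

-- ===== PRECONDITION & SPEC =====
-- Pre_ excludes exactly the inputs where Python A raises KeyError: a message without a "role" key.
def Pre_inject_system_message_py (messages : List (List (String × String))) (system_content : String) : Prop :=
  ∀ m ∈ messages, (m.lookup "role").isSome = true
instance (messages : List (List (String × String))) (system_content : String) : Decidable (Pre_inject_system_message_py messages system_content) := by unfold Pre_inject_system_message_py; infer_instance

def pvWitness_inject_system_message_py : (List (List (String × String))) × String :=
  ([[("role", "user"), ("content", "hi")]], "be helpful")

def Spec_inject_system_message_py (messages : List (List (String × String))) (system_content : String) (out : List (List (String × String))) : Prop := out = inject_system_message_py_alt messages system_content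
instance (messages : List (List (String × String))) (system_content : String) (out : List (List (String × String))) : Decidable (Spec_inject_system_message_py messages system_content out) := by unfold Spec_inject_system_message_py; infer_instance

-- ===== CLAIM (what is proved, stated in full; the proofs are below) =====
def Claim_equal_inject_system_message_py : Prop := ∀ (messages : List (List (String × String))) (system_content : String), Dom_inject_system_message_py messages system_content → Pre_inject_system_message_py messages system_content → Spec_inject_system_message_py messages system_content (inject_system_message_py messages system_content)


-- ===== LEMMAS AND PROOFS =====

-- once injected, the loop just appends the remaining messages
theorem loop_injected (newMsg : List (String × String))
    (msgs : List (List (String × String))) (acc : List (List (String × String))) :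
    inject_system_message_py_loop newMsg msgs acc true = (acc ++ msgs, true) := by
  induction msgs generalizing acc with
  | nil => simp [inject_system_message_py_loop]
  | cons msg rest ih => simp [inject_system_message_py_loop, ih]

-- the un-injected loop is a find-first-match-then-splice
theorem loop_not_injected (newMsg : List (String × String))
    (msgs : List (List (String × String))) (acc : List (List (String × String))) :
    inject_system_message_py_loop newMsg msgs acc false =
      match msgs.findIdx? (fun m => m.lookup "role" == some "system") with
      | none => (acc ++ msgs, false)
      | some i => (acc ++ msgs.take (i + 1) ++ newMsg :: msgs.drop (i + 1), true) := by
  induction msgs generalizing acc with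
  | nil => simp [inject_system_message_py_loop]
  | cons msg rest ih =>
      rw [List.findIdx?_cons]
      by_cases h : (msg.lookup "role" == some "system") = true
      · simp only [inject_system_message_py_loop, h, Bool.not_false, Bool.and_true,
          loop_injected]
        simp
      · simp only [inject_system_message_py_loop, h]
        rw [if_neg (by simp [h])]
        rw [ih]
        cases rest.findIdx? (fun m => m.lookup "role" == some "system") with
        | none => simp
        | some i => simp [List.take_succ_cons, List.drop_succ_cons]

-- ===== VERDICT (by name: the statement is the Claim_ definition above) =====
theorem inject_system_message_py_spec : Claim_equal_inject_system_message_py := by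
  intro messages system_content _ _
  unfold Spec_inject_system_message_py
  simp only [inject_system_message_py, inject_system_message_py_alt, loop_not_injected]
  cases hf : messages.findIdx? (fun m => m.lookup "role" == some "system") with
  | none => simp
  | some i => simp
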